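-- pv_equiv track=rewrite | github.com/MrChepe09/Competitive-Programming-Codes | A2OJ/Ladder 0-1300/dragons.py | dragon
-- ===== SOURCE A (Python) =====
-- def dragon(s, n, a):
--     a.sort()
--     for i in a:
--         if(i[0]>=s):
--             return "NO"
--         else:
--             s+=i[1]
--     return "YES"
-- ===== SOURCE B (Python) =====
-- def dragon(s, n, a):
--     remaining = list(a)
--     while remaining:
--         weakest = min(remaining)
--         if weakest[0] >= s:
--             return "NO"
--         s += weakest[1]
--         remaining.remove(weakest)
--     return "YES"
-- ===== Notes on version B (the rewrite author's own statement) =====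
-- stated objective: alternative
-- what changed: Replaces sort-then-scan with repeated selection: B never sorts, it repeatedly picks the lexicographically weakest remaining dragon with min(), fights it and removes it from the pool; B also does not mutate the argument a (A sorts it in place) - the equivalence is about the return value.
import Mathlib
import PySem

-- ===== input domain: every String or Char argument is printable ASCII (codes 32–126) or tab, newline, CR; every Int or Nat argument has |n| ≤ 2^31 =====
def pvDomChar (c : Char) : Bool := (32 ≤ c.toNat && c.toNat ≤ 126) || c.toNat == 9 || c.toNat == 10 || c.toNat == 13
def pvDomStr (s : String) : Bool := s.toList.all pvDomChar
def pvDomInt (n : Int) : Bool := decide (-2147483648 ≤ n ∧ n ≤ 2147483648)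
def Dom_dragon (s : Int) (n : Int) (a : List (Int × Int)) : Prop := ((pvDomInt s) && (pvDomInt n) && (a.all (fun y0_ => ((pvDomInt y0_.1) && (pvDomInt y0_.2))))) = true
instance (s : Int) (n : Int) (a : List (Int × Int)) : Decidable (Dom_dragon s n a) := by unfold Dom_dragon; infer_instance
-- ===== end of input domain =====

-- B replaces A's sort-then-scan with repeated selection: it never sorts, it repeatedly fights and
-- removes the lexicographically weakest remaining dragon (alternative algorithm, same result);
-- A sorts a in place and B does not, so the equivalence proved is about the return value only.

-- ===== PORT A =====
-- a.sort() on pairs is Python's lexicographic sort → PySem.List.sorted2 with tuple key (fst, snd).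
def dragonLoop : Int → List (Int × Int) → String
  | _, [] => "YES"
  | s, i :: rest => if i.1 ≥ s then "NO" else dragonLoop (s + i.2) rest

def dragon (s : Int) (n : Int) (a : List (Int × Int)) : String :=
  dragonLoop s (PySem.List.sorted2 a (fun p => p.1) (fun p => p.2))

-- ===== PORT B =====
-- min(remaining) on pairs is the first lexicographic minimum → PySem.List.min2? (tuple key).
-- remaining.remove(weakest) → PySem.List.remove?; the element min returns is always a member,
-- so Python's ValueError is unreachable and the .getD [] total form is never taken.
-- pvLtb/pvF/pvMin2_eq_foldl/pvFoldlSomeMem exist only to state pvMin2Mem, the membership fact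
-- the port's decreasing_by cites for termination.
def pvLtb (x y : Int × Int) : Bool :=
  decide (x.1 < y.1) || (!decide (y.1 < x.1) && decide (x.2 < y.2))

def pvF (acc : Option (Int × Int)) (x : Int × Int) : Option (Int × Int) :=
  match acc with
  | none => some x
  | some m => if pvLtb x m then some x else some m

theorem pvMin2_eq_foldl (l : List (Int × Int)) :
    PySem.List.min2? l (fun p => p.1) (fun p => p.2) = List.foldl pvF none l := by
  unfold PySem.List.min2?
  congr 1
  funext acc x
  cases acc <;> rfl

theorem pvFoldlSomeMem : ∀ (xs : List (Int × Int)) (m0 m : Int × Int),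
    List.foldl pvF (some m0) xs = some m → m = m0 ∨ m ∈ xs := by
  intro xs
  induction xs with
  | nil => intro m0 m h; simp at h; exact Or.inl h.symm
  | cons x t ih =>
    intro m0 m h
    simp only [List.foldl_cons, pvF] at h
    by_cases hc : pvLtb x m0 = true
    · rw [if_pos hc] at h
      rcases ih x m h with rfl | h2
      · exact Or.inr List.mem_cons_self
      · exact Or.inr (List.mem_cons_of_mem _ h2)
    · rw [if_neg hc] at h
      rcases ih m0 m h with rfl | h2
      · exact Or.inl rfl
      · exact Or.inr (List.mem_cons_of_mem _ h2)

theorem pvMin2Mem (l : List (Int × Int)) (m : Int × Int)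
    (h : PySem.List.min2? l (fun p => p.1) (fun p => p.2) = some m) : m ∈ l := by
  rw [pvMin2_eq_foldl] at h
  cases l with
  | nil => simp at h
  | cons x xs =>
    simp only [List.foldl_cons] at h
    rw [show pvF none x = some x from rfl] at h
    rcases pvFoldlSomeMem xs x m h with rfl | h2
    · exact List.mem_cons_self
    · exact List.mem_cons_of_mem _ h2

def dragonAltLoop (s : Int) (l : List (Int × Int)) : String :=
  match hm : PySem.List.min2? l (fun p => p.1) (fun p => p.2) with
  | none => "YES"
  | some weakest =>
    if weakest.1 ≥ s then "NO"
    else dragonAltLoop (s + weakest.2) ((PySem.List.remove? l weakest).getD [])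
termination_by l.length
decreasing_by
  have hmem : weakest ∈ l := pvMin2Mem l weakest hm
  rw [PySem.List.remove?_eq_some_erase l weakest hmem]
  have h1 : (l.erase weakest).length = l.length - 1 := List.length_erase_of_mem hmem
  have h2 : 0 < l.length := List.length_pos_of_mem hmem
  simp only [Option.getD_some]
  omega

-- remaining = list(a) copies a; the loop then runs on the copy.
def dragon_alt (s : Int) (n : Int) (a : List (Int × Int)) : String :=
  dragonAltLoop s a

-- ===== PRECONDITION & SPEC =====
def Spec_dragon (s : Int) (n : Int) (a : List (Int × Int)) (out : String) : Prop := out = dragon_alt s n a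
instance (s : Int) (n : Int) (a : List (Int × Int)) (out : String) : Decidable (Spec_dragon s n a out) := by unfold Spec_dragon; infer_instance

-- ===== CLAIM (what is proved, stated in full; the proofs are below) =====
def Claim_equal_dragon : Prop := ∀ (s : Int) (n : Int) (a : List (Int × Int)), Dom_dragon s n a → Spec_dragon s n a (dragon s n a)

-- ===== LEMMAS AND PROOFS =====

-- Total lexicographic ≤ on pairs, the reflexive closure of pvLtb.
def pvLexLe (x y : Int × Int) : Prop := x.1 < y.1 ∨ (x.1 = y.1 ∧ x.2 ≤ y.2)

theorem pvLexLe_of_ltb {x y : Int × Int} (h : pvLtb x y = true) : pvLexLe x y := by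
  simp only [pvLtb, Bool.or_eq_true, Bool.and_eq_true, Bool.not_eq_true', decide_eq_true_iff,
    decide_eq_false_iff_not] at h
  unfold pvLexLe; omega

theorem pvLexLe_of_not_ltb {x y : Int × Int} (h : ¬ pvLtb x y = true) : pvLexLe y x := by
  simp only [pvLtb, Bool.or_eq_true, Bool.and_eq_true, Bool.not_eq_true', decide_eq_true_iff,
    decide_eq_false_iff_not] at h
  unfold pvLexLe; omega

theorem pvLexLe_trans {x y z : Int × Int} (h1 : pvLexLe x y) (h2 : pvLexLe y z) : pvLexLe x z := by
  unfold pvLexLe at *; omega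

theorem pvLexLe_antisymm {x y : Int × Int} (h1 : pvLexLe x y) (h2 : pvLexLe y x) : x = y := by
  unfold pvLexLe at h1 h2
  have hx : x.1 = y.1 ∧ x.2 = y.2 := by omega
  exact Prod.ext_iff.mpr hx

-- min2? returns a lexicographic minimum of the list.
theorem pvFoldlSomeMin : ∀ (xs : List (Int × Int)) (m0 m : Int × Int),
    List.foldl pvF (some m0) xs = some m → pvLexLe m m0 ∧ ∀ y ∈ xs, pvLexLe m y := by
  intro xs
  induction xs with
  | nil =>
    intro m0 m h
    simp at h
    subst h
    exact ⟨Or.inr ⟨rfl, le_refl _⟩, by simp⟩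
  | cons x t ih =>
    intro m0 m h
    simp only [List.foldl_cons, pvF] at h
    by_cases hc : pvLtb x m0 = true
    · rw [if_pos hc] at h
      obtain ⟨h1, h2⟩ := ih x m h
      refine ⟨pvLexLe_trans h1 (pvLexLe_of_ltb hc), ?_⟩
      intro y hy
      rcases List.mem_cons.mp hy with rfl | hy
      · exact h1
      · exact h2 y hy
    · rw [if_neg hc] at h
      obtain ⟨h1, h2⟩ := ih m0 m h
      refine ⟨h1, ?_⟩
      intro y hy
      rcases List.mem_cons.mp hy with rfl | hy
      · exact pvLexLe_trans h1 (pvLexLe_of_not_ltb hc)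
      · exact h2 y hy

theorem pvMin2Min {l : List (Int × Int)} {m : Int × Int}
    (h : PySem.List.min2? l (fun p => p.1) (fun p => p.2) = some m) :
    ∀ y ∈ l, pvLexLe m y := by
  rw [pvMin2_eq_foldl] at h
  cases l with
  | nil => simp at h
  | cons x xs =>
    simp only [List.foldl_cons] at h
    rw [show pvF none x = some x from rfl] at h
    obtain ⟨h1, h2⟩ := pvFoldlSomeMin xs x m h
    intro y hy
    rcases List.mem_cons.mp hy with rfl | hy
    · exact h1
    · exact h2 y hy

theorem pvMin2None {l : List (Int × Int)}
    (h : PySem.List.min2? l (fun p => p.1) (fun p => p.2) = none) : l = [] := by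
  rw [pvMin2_eq_foldl] at h
  cases l with
  | nil => rfl
  | cons x xs =>
    exfalso
    simp only [List.foldl_cons] at h
    rw [show pvF none x = some x from rfl] at h
    have hsome : ∀ (t : List (Int × Int)) (m0 : Int × Int), List.foldl pvF (some m0) t ≠ none := by
      intro t
      induction t with
      | nil => intro m0 hh; simp at hh
      | cons y ys ih =>
        intro m0 hh
        simp only [List.foldl_cons, pvF] at hh
        split at hh
        · exact ih y hh
        · exact ih m0 hh
    exact hsome xs x h

-- sorted2 on pairs with key (fst, snd) is literally the insertBy-fold under pvLtb.
theorem pvSorted2_eq (l : List (Int × Int)) :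
    PySem.List.sorted2 l (fun p => p.1) (fun p => p.2) =
      List.foldl (fun acc x => PySem.List.insertBy pvLtb x acc) [] l := rfl

theorem pvInsertBy_pairwise {x : Int × Int} {l : List (Int × Int)}
    (h : l.Pairwise pvLexLe) : (PySem.List.insertBy pvLtb x l).Pairwise pvLexLe := by
  induction l with
  | nil => simp [PySem.List.insertBy]
  | cons y ys ih =>
    rw [List.pairwise_cons] at h
    obtain ⟨hy, hys⟩ := h
    by_cases hc : pvLtb x y = true
    · simp only [PySem.List.insertBy, hc, if_true]
      refine List.pairwise_cons.mpr ⟨?_, List.pairwise_cons.mpr ⟨hy, hys⟩⟩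
      intro z hz
      rcases List.mem_cons.mp hz with rfl | hz
      · exact pvLexLe_of_ltb hc
      · exact pvLexLe_trans (pvLexLe_of_ltb hc) (hy z hz)
    · simp only [PySem.List.insertBy, hc]
      refine List.pairwise_cons.mpr ⟨?_, ih hys⟩
      intro z hz
      rcases (PySem.List.mem_insertBy pvLtb x z ys).mp hz with rfl | hz
      · exact pvLexLe_of_not_ltb hc
      · exact hy z hz

theorem pvSorted2_pairwise (l : List (Int × Int)) :
    (PySem.List.sorted2 l (fun p => p.1) (fun p => p.2)).Pairwise pvLexLe := by
  rw [pvSorted2_eq]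
  have H : ∀ (t acc : List (Int × Int)), acc.Pairwise pvLexLe →
      (List.foldl (fun acc x => PySem.List.insertBy pvLtb x acc) acc t).Pairwise pvLexLe := by
    intro t
    induction t with
    | nil => intro acc h; simpa using h
    | cons y ys ih =>
      intro acc h
      simp only [List.foldl_cons]
      exact ih _ (pvInsertBy_pairwise h)
  exact H l [] List.Pairwise.nil

-- Pulling the lexicographic minimum to the front of the sorted list.
theorem pvSorted2_cons_min {l : List (Int × Int)} {m : Int × Int}
    (hm : m ∈ l) (hmin : ∀ y ∈ l, pvLexLe m y) :
    PySem.List.sorted2 l (fun p => p.1) (fun p => p.2) =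
      m :: PySem.List.sorted2 (l.erase m) (fun p => p.1) (fun p => p.2) := by
  have hperm : (PySem.List.sorted2 l (fun p => p.1) (fun p => p.2)).Perm
      (m :: PySem.List.sorted2 (l.erase m) (fun p => p.1) (fun p => p.2)) :=
    ((PySem.List.sorted2_perm l (fun p => p.1) (fun p => p.2) false).trans
      (List.perm_cons_erase hm)).trans
      (List.Perm.cons m (PySem.List.sorted2_perm (l.erase m) (fun p => p.1) (fun p => p.2) false).symm)
  have hs1 : (PySem.List.sorted2 l (fun p => p.1) (fun p => p.2)).Pairwise pvLexLe :=
    pvSorted2_pairwise l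
  have hs2 : (m :: PySem.List.sorted2 (l.erase m) (fun p => p.1) (fun p => p.2)).Pairwise pvLexLe := by
    refine List.pairwise_cons.mpr ⟨?_, pvSorted2_pairwise _⟩
    intro z hz
    have hz' : z ∈ l.erase m :=
      (PySem.List.sorted2_perm (l.erase m) (fun p => p.1) (fun p => p.2) false).mem_iff.mp hz
    exact hmin z (List.mem_of_mem_erase hz')
  exact hperm.eq_of_pairwise (fun a b _ _ hab hba => pvLexLe_antisymm hab hba) hs1 hs2

-- The main invariant: B's selection loop equals A's scan over the sorted list.
theorem pvAltLoop_eq : ∀ (k : Nat) (l : List (Int × Int)), l.length = k → ∀ (s : Int),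
    dragonAltLoop s l = dragonLoop s (PySem.List.sorted2 l (fun p => p.1) (fun p => p.2)) := by
  intro k
  induction k using Nat.strong_induction_on with
  | _ k ih =>
    intro l hk s
    rw [dragonAltLoop]
    split
    · next hm =>
      rw [pvMin2None hm]
      rfl
    · next m hm =>
      have hmem : m ∈ l := pvMin2Mem l m hm
      have hmin : ∀ y ∈ l, pvLexLe m y := pvMin2Min hm
      rw [pvSorted2_cons_min hmem hmin]
      rw [PySem.List.remove?_eq_some_erase l m hmem, Option.getD_some]
      have hlen : (l.erase m).length = l.length - 1 := List.length_erase_of_mem hmem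
      have hpos : 0 < l.length := List.length_pos_of_mem hmem
      by_cases hc : m.1 ≥ s
      · simp [dragonLoop, hc]
      · rw [if_neg hc]
        simp only [dragonLoop, if_neg hc]
        exact ih (l.erase m).length (by omega) _ rfl (s + m.2)

-- ===== VERDICT (by name: the statement is the Claim_ definition above) =====
theorem dragon_spec : Claim_equal_dragon := by
  intro s n a _
  unfold Spec_dragon dragon dragon_alt
  exact (pvAltLoop_eq a.length a rfl s).symm
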